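-- pv_equiv track=rewrite | github.com/bcsizmadia/aoc2022 | solutions/day6.py | solve
-- ===== SOURCE A (Python) =====
-- def solve(datastream, limit):
--     markers = []
--     processed = 0
--
--     for char in datastream:
--         markers.append(char)
--         if len(markers) > limit:
--             markers.pop(0)
--         processed += 1
--         if len(set(markers)) == len(markers) and len(markers) >= limit:
--             return processed
-- ===== SOURCE B (Python) =====
-- def solve(datastream, limit):
--     # Sliding window: `start` is the left edge of the longest all-distinct
--     # suffix; `last` maps each char to its most recent index.  O(n) total.
--     last = {}
--     start = 0
--     for i, ch in enumerate(datastream):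
--         j = last.get(ch)
--         if j is not None and j >= start:
--             start = j + 1
--         last[ch] = i
--         if i - start + 1 >= limit:
--             return i + 1
-- ===== Notes on version B (the rewrite author's own statement) =====
-- stated objective: faster
-- what changed: Replaces A's per-character window copy + set() rebuild (O(limit) work per char) with a single-pass sliding window keeping a last-seen-index dict and a window start pointer, O(1) amortized per char.
import Mathlib
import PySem

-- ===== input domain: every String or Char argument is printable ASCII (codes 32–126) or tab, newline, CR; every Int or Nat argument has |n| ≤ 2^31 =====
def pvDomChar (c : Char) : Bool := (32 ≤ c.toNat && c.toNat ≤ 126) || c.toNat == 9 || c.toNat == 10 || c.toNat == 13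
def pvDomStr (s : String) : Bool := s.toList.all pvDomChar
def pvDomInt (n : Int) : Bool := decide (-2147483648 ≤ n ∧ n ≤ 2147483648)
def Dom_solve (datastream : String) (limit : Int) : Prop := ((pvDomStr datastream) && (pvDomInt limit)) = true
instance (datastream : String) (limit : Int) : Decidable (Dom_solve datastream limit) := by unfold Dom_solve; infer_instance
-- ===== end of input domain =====

-- B replaces A's per-character window copy and set() rebuild with a one-pass sliding window
-- (last-seen-index dict + start pointer); measured asymptotically faster on large inputs.


-- ===== PORT A =====
-- markers.pop(0) happens only right after an append, so the list is nonempty and pop(0) is exactly .tail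
def solveA_loop (limit : Int) : List Char → List Char → Int → Option Int
  | [], _, _ => none
  | c :: rest, markers, processed =>
    let m1 := markers ++ [c]
    let m2 := if (m1.length : Int) > limit then m1.tail else m1
    let processed := processed + 1
    if (PySem.Set.ofList m2).length = m2.length ∧ (m2.length : Int) ≥ limit then
      some processed
    else solveA_loop limit rest m2 processed

def solve (datastream : String) (limit : Int) : Option Int :=
  solveA_loop limit datastream.toList [] 0

-- ===== PORT B =====
def solveB_loop (limit : Int) : List (Int × Char) → PySem.Dict Char Int → Int → Option Int
  | [], _, _ => none
  | (i, ch) :: rest, last, start =>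
    let start :=
      match last.get? ch with      -- j = last.get(ch); if j is not None and j >= start: start = j + 1
      | some j => if j ≥ start then j + 1 else start
      | none => start
    let last := last.insert ch i
    if i - start + 1 ≥ limit then some (i + 1) else solveB_loop limit rest last start

def solve_alt (datastream : String) (limit : Int) : Option Int :=
  solveB_loop limit (PySem.List.enumerate datastream.toList 0) PySem.Dict.empty 0

-- ===== PRECONDITION & SPEC =====
def Spec_solve (datastream : String) (limit : Int) (out : Option Int) : Prop := out = solve_alt datastream limit
instance (datastream : String) (limit : Int) (out : Option Int) : Decidable (Spec_solve datastream limit out) := by unfold Spec_solve; infer_instance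

-- ===== CLAIM (what is proved, stated in full; the proofs are below) =====
def Claim_equal_solve : Prop := ∀ (datastream : String) (limit : Int), Dom_solve datastream limit → Spec_solve datastream limit (solve datastream limit)

-- ===== LEMMAS AND PROOFS =====

-- startOf p = left edge of the longest duplicate-free suffix of p (B's `start` after processing p)
lemma exists_drop_nodup (p : List Char) : ∃ s, (p.drop s).Nodup := ⟨p.length, by simp⟩

def startOf (p : List Char) : Nat := Nat.find (exists_drop_nodup p)

lemma startOf_le (p : List Char) : startOf p ≤ p.length := Nat.find_le (by simp)

lemma nodup_drop_startOf (p : List Char) : (p.drop (startOf p)).Nodup := Nat.find_spec (exists_drop_nodup p)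

lemma nodup_drop_le (p : List Char) {a b : Nat} (hab : a ≤ b) (h : (p.drop a).Nodup) :
    (p.drop b).Nodup := by
  have : p.drop b = (p.drop a).drop (b - a) := by rw [List.drop_drop]; congr 1; omega
  rw [this]
  exact (List.drop_sublist _ _).nodup h

lemma nodup_drop_iff (p : List Char) (s : Nat) : (p.drop s).Nodup ↔ startOf p ≤ s :=
  ⟨fun h => Nat.find_le h, fun h => nodup_drop_le p h (nodup_drop_startOf p)⟩

lemma startOf_nil : startOf ([] : List Char) = 0 := by
  have := startOf_le ([] : List Char); simpa using this

-- appending one element: nodup iff the element is new and the rest was nodup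
lemma nodup_snoc (xs : List Char) (c : Char) : (xs ++ [c]).Nodup ↔ c ∉ xs ∧ xs.Nodup := by
  rw [← List.concat_eq_append, List.nodup_concat]

-- start does not move when the new char is absent from the current window
lemma startOf_append_of_not_mem (p : List Char) (c : Char)
    (hc : c ∉ p.drop (startOf p)) : startOf (p ++ [c]) = startOf p := by
  apply le_antisymm
  · apply Nat.find_le
    rw [List.drop_append_of_le_length (startOf_le p), nodup_snoc]
    exact ⟨hc, nodup_drop_startOf p⟩
  · by_contra hlt
    rw [not_le] at hlt
    have hnd := nodup_drop_startOf (p ++ [c])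
    have hle : startOf (p ++ [c]) ≤ p.length := le_trans (le_of_lt hlt) (startOf_le p)
    rw [List.drop_append_of_le_length hle, nodup_snoc] at hnd
    exact absurd ((nodup_drop_iff p _).mp hnd.2) (by omega)

-- start jumps to k+1 when the new char last occurred at k inside the window
lemma startOf_append_of_last (p : List Char) (c : Char) (k : Nat)
    (hk : p[k]? = some c) (hlast : ∀ m : Nat, k < m → p[m]? ≠ some c)
    (hs : startOf p ≤ k) : startOf (p ++ [c]) = k + 1 := by
  have hklt : k < p.length := by
    by_contra h
    rw [List.getElem?_eq_none (by omega)] at hk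
    simp at hk
  apply le_antisymm
  · apply Nat.find_le
    rw [List.drop_append_of_le_length (by omega), nodup_snoc]
    refine ⟨?_, nodup_drop_le p (by omega) (nodup_drop_startOf p)⟩
    intro hmem
    obtain ⟨m, hm⟩ := List.mem_iff_getElem?.mp hmem
    rw [List.getElem?_drop] at hm
    exact hlast (k + 1 + m) (by omega) hm
  · by_contra hlt
    rw [not_le] at hlt
    have hle : startOf (p ++ [c]) ≤ p.length := by omega
    have hnd := nodup_drop_startOf (p ++ [c])
    rw [List.drop_append_of_le_length hle, nodup_snoc] at hnd
    apply hnd.1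
    apply List.mem_iff_getElem?.mpr
    refine ⟨k - startOf (p ++ [c]), ?_⟩
    rw [List.getElem?_drop]
    rw [show startOf (p ++ [c]) + (k - startOf (p ++ [c])) = k by omega]
    exact hk

-- the Python set(xs) has as many elements as xs iff xs has no duplicates
lemma ofList_sublist (xs : List Char) : (PySem.Set.ofList xs).Sublist xs := by
  induction xs using List.reverseRecOn with
  | nil => simp [PySem.Set.ofList_nil]
  | append_singleton ys y ih =>
    rw [PySem.Set.ofList_append_singleton, PySem.Set.add]
    by_cases h : PySem.Set.contains (PySem.Set.ofList ys) y
    · rw [if_pos h]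
      exact ih.trans (List.sublist_append_left ys [y])
    · rw [if_neg h]
      exact ih.append (List.Sublist.refl [y])

lemma length_ofList_eq_iff (xs : List Char) :
    (PySem.Set.ofList xs).length = xs.length ↔ xs.Nodup := by
  constructor
  · intro h
    rw [← (ofList_sublist xs).eq_of_length h]
    exact PySem.Set.nodup_ofList xs
  · intro h
    rw [PySem.Set.ofList_eq_self_of_nodup _ h]

-- A's success test on the window equals B's arithmetic test on start
lemma condA_iff (limit : Int) (hl : 1 ≤ limit) (q : List Char) :
    ((PySem.Set.ofList (q.drop (q.length - limit.toNat))).length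
        = (q.drop (q.length - limit.toNat)).length
      ∧ ((q.drop (q.length - limit.toNat)).length : Int) ≥ limit)
    ↔ ((q.length : Int) - (startOf q : Int) ≥ limit) := by
  rw [length_ofList_eq_iff, nodup_drop_iff, List.length_drop]
  have h1 := startOf_le q
  have h2 : ((limit.toNat : Nat) : Int) = limit := Int.toNat_of_nonneg (by omega)
  omega

-- A's append-then-maybe-pop step keeps the window = last `limit` chars
lemma windowStep (limit : Int) (hl : 1 ≤ limit) (p : List Char) (c : Char) :
    (if ((p.drop (p.length - limit.toNat) ++ [c]).length : Int) > limit
      then (p.drop (p.length - limit.toNat) ++ [c]).tail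
      else p.drop (p.length - limit.toNat) ++ [c])
    = (p ++ [c]).drop ((p ++ [c]).length - limit.toNat) := by
  have h2 : ((limit.toNat : Nat) : Int) = limit := Int.toNat_of_nonneg (by omega)
  by_cases hp : limit.toNat ≤ p.length
  · rw [if_pos (by simp [List.length_drop]; omega)]
    have hne : p.drop (p.length - limit.toNat) ≠ [] := by
      apply List.ne_nil_of_length_pos
      rw [List.length_drop]; omega
    rw [List.tail_append_of_ne_nil hne, List.tail_drop,
        List.length_append,
        List.drop_append_of_le_length (by simp; omega)]
    congr 2
    simp; omega
  · rw [if_neg (by simp [List.length_drop]; omega)]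
    rw [show p.length - limit.toNat = 0 from by omega,
        show (p ++ [c]).length - limit.toNat = 0 from by simp; omega]
    simp

-- B's dict maps each char to the index of its last occurrence in the consumed prefix
def LastSpec (p : List Char) (d : PySem.Dict Char Int) : Prop :=
  ∀ x : Char,
    (∀ j : Int, d.get? x = some j →
      ∃ k : Nat, j = (k : Int) ∧ p[k]? = some x ∧ ∀ m : Nat, k < m → p[m]? ≠ some x)
    ∧ (d.get? x = none → x ∉ p)

lemma lastSpec_nil : LastSpec [] PySem.Dict.empty := by
  intro x
  constructor
  · intro j hj; simp [PySem.Dict.get?_empty] at hj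
  · intro _; simp

lemma lastSpec_insert (p : List Char) (c : Char) (d : PySem.Dict Char Int)
    (h : LastSpec p d) : LastSpec (p ++ [c]) (d.insert c (p.length : Int)) := by
  intro x
  by_cases hx : x = c
  · subst hx
    constructor
    · intro j hj
      rw [PySem.Dict.get?_insert_self] at hj
      refine ⟨p.length, (Option.some.injEq _ _).mp hj.symm, by simp, ?_⟩
      intro m hm
      rw [List.getElem?_eq_none (by simp; omega)]
      simp
    · intro h0
      rw [PySem.Dict.get?_insert_self] at h0
      simp at h0
  · constructor
    · intro j hj
      rw [PySem.Dict.get?_insert_of_ne _ _ hx] at hj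
      obtain ⟨k, hk1, hk2, hk3⟩ := (h x).1 j hj
      have hklt : k < p.length := by
        by_contra hc2
        rw [List.getElem?_eq_none (by omega)] at hk2
        simp at hk2
      refine ⟨k, hk1, by rw [List.getElem?_append_left hklt]; exact hk2, ?_⟩
      intro m hm
      by_cases hmp : m < p.length
      · rw [List.getElem?_append_left hmp]; exact hk3 m hm
      · by_cases hme : m = p.length
        · subst hme
          rw [List.getElem?_concat_length]
          intro h'
          exact hx ((Option.some.injEq _ _).mp h').symm
        · rw [List.getElem?_eq_none (by simp; omega)]
          simp
    · intro h0
      rw [PySem.Dict.get?_insert_of_ne _ _ hx] at h0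
      have := (h x).2 h0
      simp only [List.mem_append, List.mem_singleton]
      rintro (hmem | hmem)
      · exact this hmem
      · exact hx hmem

-- B's start update computes startOf of the extended prefix
lemma start_update (p : List Char) (c : Char) (d : PySem.Dict Char Int)
    (h : LastSpec p d) :
    (match d.get? c with
     | some j => if j ≥ (startOf p : Int) then j + 1 else (startOf p : Int)
     | none => (startOf p : Int))
    = ((startOf (p ++ [c]) : Nat) : Int) := by
  cases hg : d.get? c with
  | none =>
    have hnm : c ∉ p := (h c).2 hg
    simp only []
    rw [startOf_append_of_not_mem p c (fun hm => hnm (List.mem_of_mem_drop hm))]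
  | some j =>
    obtain ⟨k, hk1, hk2, hk3⟩ := (h c).1 j hg
    subst hk1
    simp only []
    by_cases hks : (k : Int) ≥ (startOf p : Int)
    · rw [if_pos hks, startOf_append_of_last p c k hk2 hk3 (by exact_mod_cast hks)]
      push_cast; ring
    · rw [if_neg hks]
      have hklt : k < startOf p := by omega
      rw [startOf_append_of_not_mem p c]
      intro hmem
      obtain ⟨m, hm⟩ := List.mem_iff_getElem?.mp hmem
      rw [List.getElem?_drop] at hm
      exact hk3 _ (by omega) hm

-- the two loops agree step for step (limit ≥ 1)
lemma loop_eq (limit : Int) (hl : 1 ≤ limit) :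
    ∀ (rest p : List Char) (d : PySem.Dict Char Int),
      LastSpec p d →
      solveA_loop limit rest (p.drop (p.length - limit.toNat)) (p.length : Int)
        = solveB_loop limit (PySem.List.enumerate rest (p.length : Int)) d ((startOf p : Nat) : Int) := by
  intro rest
  induction rest with
  | nil => intro p d _; simp [solveA_loop, solveB_loop, PySem.List.enumerate]
  | cons c rest ih =>
    intro p d hd
    rw [PySem.List.enumerate_cons]
    show (let m1 := p.drop (p.length - limit.toNat) ++ [c];
          let m2 := if (m1.length : Int) > limit then m1.tail else m1;
          let processed := (p.length : Int) + 1;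
          if (PySem.Set.ofList m2).length = m2.length ∧ (m2.length : Int) ≥ limit then
            some processed
          else solveA_loop limit rest m2 processed) = _
    simp only [windowStep limit hl p c]
    show _ = (let start :=
                match d.get? c with
                | some j => if j ≥ ((startOf p : Nat) : Int) then j + 1 else ((startOf p : Nat) : Int)
                | none => ((startOf p : Nat) : Int);
              let last := d.insert c (p.length : Int);
              if (p.length : Int) - start + 1 ≥ limit then some ((p.length : Int) + 1)
              else solveB_loop limit (PySem.List.enumerate rest ((p.length : Int) + 1)) last start)
    simp only [start_update p c d hd]
    have hq : (p ++ [c]).length = p.length + 1 := by simp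
    have hcond : ((PySem.Set.ofList ((p ++ [c]).drop ((p ++ [c]).length - limit.toNat))).length
          = ((p ++ [c]).drop ((p ++ [c]).length - limit.toNat)).length
        ∧ (((p ++ [c]).drop ((p ++ [c]).length - limit.toNat)).length : Int) ≥ limit)
        ↔ ((p.length : Int) - ((startOf (p ++ [c]) : Nat) : Int) + 1 ≥ limit) := by
      rw [condA_iff limit hl (p ++ [c]), hq]
      push_cast
      omega
    by_cases hc : (p.length : Int) - ((startOf (p ++ [c]) : Nat) : Int) + 1 ≥ limit
    · rw [if_pos (hcond.mpr hc), if_pos hc]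
    · rw [if_neg (fun h => hc (hcond.mp h)), if_neg hc]
      have := ih (p ++ [c]) (d.insert c (p.length : Int)) (lastSpec_insert p c d hd)
      simp only [hq] at this ⊢
      push_cast at this ⊢
      exact this

-- limit ≤ 0: both return 1 on any nonempty string (A's window is always empty, B's test is 1 ≥ limit)
lemma both_nonpos (limit : Int) (hl : limit ≤ 0) (l : List Char) :
    solveA_loop limit l [] 0 = solveB_loop limit (PySem.List.enumerate l 0) PySem.Dict.empty 0 := by
  cases l with
  | nil => simp [solveA_loop, solveB_loop, PySem.List.enumerate]
  | cons c rest =>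
    rw [PySem.List.enumerate_cons]
    simp only [solveA_loop, solveB_loop, PySem.Dict.get?_empty, List.nil_append,
      List.length_cons, List.length_nil, List.tail_cons]
    norm_num [show PySem.Set.ofList ([] : List Char) = [] from rfl]
    split_ifs <;>
      first
      | rfl
      | omega
      | (norm_num [show PySem.Set.ofList ([] : List Char) = [] from rfl] at *; omega)

-- ===== VERDICT (by name: the statement is the Claim_ definition above) =====
theorem solve_spec : Claim_equal_solve := by
  intro datastream limit _
  unfold Spec_solve solve solve_alt
  by_cases hl : 1 ≤ limit
  · have := loop_eq limit hl datastream.toList [] PySem.Dict.empty lastSpec_nil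
    simpa [startOf_nil] using this
  · exact both_nonpos limit (by omega) datastream.toList
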